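-- pv_equiv track=rewrite | github.com/LucasKazaki/enae450-final-competition | maze_solver.py | strip_ros_args
-- ===== SOURCE A (Python) =====
-- def strip_ros_args(argv):
--     out = []
--     skip = False
--     for i, a in enumerate(argv):
--         if skip:
--             skip = False
--             continue
--         if a == '--ros-args':
--             continue
--         if a in ('-r', '--remap', '-p', '--params-file'):
--             skip = True
--             continue
--         out.append(a)
--     return out
-- ===== SOURCE B (Python) =====
-- _SPECIAL = {'--ros-args', '-r', '--remap', '-p', '--params-file'}
--
-- def strip_ros_args(argv):
--     # Chunked scan: copy the run of plain tokens before the next special token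
--     # wholesale, then cut 1 ('--ros-args') or 2 (value flag + its argument)
--     # tokens and continue on the remaining suffix.
--     out = []
--     rest = argv
--     while rest:
--         j = next((k for k, t in enumerate(rest) if t in _SPECIAL), len(rest))
--         out.extend(rest[:j])
--         if j == len(rest):
--             break
--         rest = rest[j + 1:] if rest[j] == '--ros-args' else rest[j + 2:]
--     return out
-- ===== Notes on version B (the rewrite author's own statement) =====
-- stated objective: alternative
-- what changed: Replaces A's per-element loop with a cross-iteration skip boolean by a chunked find-and-split scan: find the next special token, copy the whole plain prefix at once, cut one or two tokens, and continue on the remaining suffix.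
import Mathlib
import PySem

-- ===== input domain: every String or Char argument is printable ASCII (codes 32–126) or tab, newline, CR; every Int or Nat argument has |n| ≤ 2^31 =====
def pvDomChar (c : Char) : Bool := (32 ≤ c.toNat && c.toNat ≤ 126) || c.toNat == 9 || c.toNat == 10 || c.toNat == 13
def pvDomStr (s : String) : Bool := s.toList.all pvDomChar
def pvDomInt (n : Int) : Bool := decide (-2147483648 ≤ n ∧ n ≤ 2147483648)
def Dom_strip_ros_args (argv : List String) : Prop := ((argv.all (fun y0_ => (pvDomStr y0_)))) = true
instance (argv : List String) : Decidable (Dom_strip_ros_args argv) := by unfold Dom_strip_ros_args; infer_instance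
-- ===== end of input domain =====

-- B replaces A's per-element skip-flag loop with a chunked find-next-special-token scan that copies plain runs wholesale (alternative decomposition, same O(n)).


-- ===== PORT A =====
-- A: single pass with accumulator `out` and a cross-iteration boolean `skip`
-- (the enumerate index i is unused in the Python, so we fold over the list directly).
def stripAStep (st : List String × Bool) (a : String) : List String × Bool :=
  if st.2 then (st.1, false)
  else if a = "--ros-args" then st
  else if a = "-r" ∨ a = "--remap" ∨ a = "-p" ∨ a = "--params-file" then (st.1, true)
  else (st.1 ++ [a], st.2)

def strip_ros_args (argv : List String) : List String :=
  (argv.foldl stripAStep ([], false)).1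

-- ===== PORT B =====
-- B: membership in the special-token set
def pvSpecial (a : String) : Bool :=
  a == "--ros-args" || a == "-r" || a == "--remap" || a == "-p" || a == "--params-file"

-- B's while loop: find the index j of the next special token (= length if none),
-- extend `out` with the plain prefix rest[:j], then continue on rest[j+1:] or rest[j+2:].
def stripBLoop (out rest : List String) : List String :=
  let j := rest.findIdx pvSpecial
  if h : j < rest.length then
    if rest[j] = "--ros-args" then
      stripBLoop (out ++ rest.take j) (rest.drop (j + 1))
    else
      stripBLoop (out ++ rest.take j) (rest.drop (j + 2))
  else out ++ rest
termination_by rest.length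
decreasing_by
  · simp only [List.length_drop]; omega
  · simp only [List.length_drop]; omega

def strip_ros_args_alt (argv : List String) : List String :=
  stripBLoop [] argv

-- ===== PRECONDITION & SPEC =====
def Spec_strip_ros_args (argv : List String) (out : List String) : Prop := out = strip_ros_args_alt argv
instance (argv : List String) (out : List String) : Decidable (Spec_strip_ros_args argv out) := by unfold Spec_strip_ros_args; infer_instance

-- ===== CLAIM (what is proved, stated in full; the proofs are below) =====
def Claim_equal_strip_ros_args : Prop := ∀ (argv : List String), Dom_strip_ros_args argv → Spec_strip_ros_args argv (strip_ros_args argv)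

-- ===== LEMMAS AND PROOFS =====
-- A's fold with skip=true over l computes the same list as with skip=false over l.tail.
theorem stripA_skip (l : List String) (out : List String) :
    (l.foldl stripAStep (out, true)).1 = (l.tail.foldl stripAStep (out, false)).1 := by
  cases l with
  | nil => rfl
  | cons b t => simp [stripAStep]

-- A plain (non-special) head is appended by B immediately.
theorem stripBLoop_cons_plain (a : String) (t out : List String) (ha : pvSpecial a = false) :
    stripBLoop out (a :: t) = stripBLoop (out ++ [a]) t := by
  conv_lhs => rw [stripBLoop]
  conv_rhs => rw [stripBLoop]
  simp only [List.findIdx_cons, ha, cond_false, List.length_cons]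
  by_cases h : t.findIdx pvSpecial < t.length
  · simp only [Nat.add_lt_add_iff_right, h, dif_pos, List.getElem_cons_succ,
      List.take_succ_cons, List.drop_succ_cons]
    split <;> simp
  · simp [h]

-- Main invariant: B's chunked scan equals A's fold from skip=false.
theorem stripB_eq_A : ∀ n (l : List String), l.length ≤ n → ∀ out : List String,
    stripBLoop out l = (l.foldl stripAStep (out, false)).1 := by
  intro n
  induction n with
  | zero =>
    intro l hl out
    have : l = [] := List.eq_nil_of_length_eq_zero (Nat.le_zero.mp hl)
    subst this; simp [stripBLoop]
  | succ n ih =>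
    intro l hl out
    cases l with
    | nil => simp [stripBLoop]
    | cons a t =>
      by_cases hs : pvSpecial a = true
      · rw [stripBLoop]
        simp only [List.findIdx_cons, hs, cond_true, List.length_cons]
        have hlt : 0 < t.length + 1 := Nat.succ_pos _
        simp only [hlt, dif_pos, List.getElem_cons_zero, List.take_zero, List.append_nil,
          List.drop_succ_cons, List.drop_zero, List.drop_one]
        by_cases hr : a = "--ros-args"
        · simp only [hr]
          rw [ih t (by simpa using Nat.lt_succ_iff.mp (Nat.lt_of_lt_of_le (by simp) hl)) out]
          simp [List.foldl_cons, stripAStep]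
        · have hflag : a = "-r" ∨ a = "--remap" ∨ a = "-p" ∨ a = "--params-file" := by
            simp only [pvSpecial, Bool.or_eq_true, beq_iff_eq] at hs
            tauto
          simp only [hr]
          rw [ih t.tail (by have := t.length_tail; simp at hl; omega) out]
          simp only [List.foldl_cons, stripAStep, hr, if_pos hflag,
            Bool.false_eq_true, if_false]
          exact (stripA_skip t out).symm
      · have hsf : pvSpecial a = false := by simpa using hs
        rw [stripBLoop_cons_plain a t out hsf]
        rw [ih t (by simp at hl; omega) (out ++ [a])]
        have hr : ¬ a = "--ros-args" := by
          intro h; simp [pvSpecial, h] at hsf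
        have hflag : ¬ (a = "-r" ∨ a = "--remap" ∨ a = "-p" ∨ a = "--params-file") := by
          intro h; rcases h with h | h | h | h <;> simp [pvSpecial, h] at hsf
        simp [List.foldl_cons, stripAStep, hr, hflag]

-- ===== VERDICT (by name: the statement is the Claim_ definition above) =====
theorem strip_ros_args_spec : Claim_equal_strip_ros_args := by
  intro argv _
  unfold Spec_strip_ros_args strip_ros_args strip_ros_args_alt
  exact (stripB_eq_A argv.length argv (Nat.le_refl _) []).symm
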